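-- pv_equiv track=rewrite | github.com/IsaacBraamGit/PokemonRed-PPO-DQN | baselines/PLOT.py | combine_lines_into_entries
-- ===== SOURCE A (Python) =====
-- def combine_lines_into_entries(lines):
--     entries = []
--     current_entry = ""
--     for line in lines:
--         current_entry += line.strip()
--         if line.strip().endswith(')'):
--             entries.append(current_entry)
--             current_entry = ""
--     return entries
-- ===== SOURCE B (Python) =====
-- def _group(ss):
--     # ss: already-stripped lines. Emit the joined prefix up to the first
--     # boundary (a line ending with ')'), then recurse on the rest; an
--     # unterminated tail yields nothing.
--     for i, s in enumerate(ss):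
--         if s.endswith(')'):
--             return ["".join(ss[:i + 1])] + _group(ss[i + 1:])
--     return []
--
-- def combine_lines_into_entries(lines):
--     return _group([line.strip() for line in lines])
-- ===== Notes on version B (the rewrite author's own statement) =====
-- stated objective: alternative
-- what changed: Replaces the single accumulator fold with a recursive decomposition: strip all lines once, then repeatedly find the first boundary line ending with ')', emit the joined prefix and recurse on the remainder (the unterminated tail disappears in the base case).
import Mathlib
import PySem

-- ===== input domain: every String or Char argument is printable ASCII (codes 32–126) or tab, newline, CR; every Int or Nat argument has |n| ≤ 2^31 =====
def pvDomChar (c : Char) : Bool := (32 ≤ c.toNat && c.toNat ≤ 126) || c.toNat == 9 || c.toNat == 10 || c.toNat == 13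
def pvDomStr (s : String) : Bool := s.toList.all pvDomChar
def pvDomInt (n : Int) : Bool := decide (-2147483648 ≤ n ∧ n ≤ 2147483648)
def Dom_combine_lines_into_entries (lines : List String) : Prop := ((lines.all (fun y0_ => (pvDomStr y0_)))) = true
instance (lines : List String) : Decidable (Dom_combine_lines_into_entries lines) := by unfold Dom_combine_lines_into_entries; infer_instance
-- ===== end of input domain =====

-- B replaces A's accumulator fold by a recursive first-boundary decomposition (alternative structure, same cost).

-- ===== PORT A =====
def combine_lines_into_entries (lines : List String) : List String :=
  (lines.foldl (fun st line =>
      let current := st.2 ++ PySem.Str.strip line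
      if PySem.Str.endswith (PySem.Str.strip line) ")" then (st.1 ++ [current], "")
      else (st.1, current))
    ([], "")).1

-- ===== PORT B =====
-- the 'for i, s in enumerate(ss): if s.endswith(')'): …' scan of _group, as the index of the first boundary
def pvFirstBound : List String → Option Nat
  | [] => none
  | s :: ss => if PySem.Str.endswith s ")" then some 0 else (pvFirstBound ss).map (· + 1)

theorem pvFirstBound_lt {ss : List String} {i : Nat} (h : pvFirstBound ss = some i) : i < ss.length := by
  induction ss generalizing i with
  | nil => simp [pvFirstBound] at h
  | cons s ss ih =>
    simp only [pvFirstBound] at h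
    split at h
    · simp only [Option.some.injEq] at h
      simp only [List.length_cons]
      omega
    · cases hb : pvFirstBound ss with
      | none => simp [hb] at h
      | some j =>
        simp only [hb, Option.map_some, Option.some.injEq] at h
        have hj := ih hb
        simp only [List.length_cons]
        omega

-- _group: ss[:i+1] / ss[i+1:] have the nonnegative bound i+1, so they are exactly take/drop
def pvGroup (ss : List String) : List String :=
  match h : pvFirstBound ss with
  | some i => PySem.Str.join "" (ss.take (i + 1)) :: pvGroup (ss.drop (i + 1))
  | none => []
termination_by ss.length
decreasing_by
  have hlt := pvFirstBound_lt h
  simp only [List.length_drop]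
  omega

def combine_lines_into_entries_alt (lines : List String) : List String :=
  pvGroup (lines.map PySem.Str.strip)

-- ===== PRECONDITION & SPEC =====
def Spec_combine_lines_into_entries (lines : List String) (out : List String) : Prop := out = combine_lines_into_entries_alt lines
instance (lines : List String) (out : List String) : Decidable (Spec_combine_lines_into_entries lines out) := by unfold Spec_combine_lines_into_entries; infer_instance

-- ===== CLAIM (what is proved, stated in full; the proofs are below) =====
def Claim_equal_combine_lines_into_entries : Prop := ∀ (lines : List String), Dom_combine_lines_into_entries lines → Spec_combine_lines_into_entries lines (combine_lines_into_entries lines)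

-- ===== LEMMAS AND PROOFS =====

-- ''.join distributes over cons when the separator is empty
theorem joinE_cons (x : String) (xs : List String) :
    PySem.Str.join "" (x :: xs) = x ++ PySem.Str.join "" xs := by
  cases xs with
  | nil => apply String.ext; simp [PySem.Str.join, PySem.Chars.join, List.intercalate]
  | cons y ys =>
    apply String.ext
    simp [PySem.Str.join, PySem.Chars.join, List.intercalate]

theorem joinE_singleton (x : String) : PySem.Str.join "" [x] = x := by
  apply String.ext; simp [PySem.Str.join, PySem.Chars.join, List.intercalate]

-- pvGroup with an open first entry: one step of the recursion, prefixed by cur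
def pvGroupP (cur : String) (ss : List String) : List String :=
  match pvFirstBound ss with
  | some i => (cur ++ PySem.Str.join "" (ss.take (i + 1))) :: pvGroup (ss.drop (i + 1))
  | none => []

theorem pvGroup_eq_groupP (ss : List String) : pvGroup ss = pvGroupP "" ss := by
  rw [pvGroup, pvGroupP]
  cases h : pvFirstBound ss <;> simp

theorem main_invariant (ss : List String) (es : List String) (cur : String) :
    (ss.foldl (fun st s =>
        if PySem.Str.endswith s ")" then (st.1 ++ [st.2 ++ s], "")
        else (st.1, st.2 ++ s)) (es, cur)).1 = es ++ pvGroupP cur ss := by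
  induction ss generalizing es cur with
  | nil => simp [pvGroupP, pvFirstBound]
  | cons s ss ih =>
    simp only [List.foldl_cons]
    by_cases hb : PySem.Str.endswith s ")" = true
    · simp only [hb, if_pos]
      rw [ih]
      have h1 : pvGroupP cur (s :: ss) = (cur ++ PySem.Str.join "" [s]) :: pvGroup ss := by
        simp only [pvGroupP, pvFirstBound, hb, if_pos]
        simp
      rw [h1, joinE_singleton, pvGroup_eq_groupP]
      simp
    · simp only [hb, if_neg, Bool.false_eq_true, not_false_iff]
      rw [ih]
      have h2 : pvGroupP cur (s :: ss) = pvGroupP (cur ++ s) ss := by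
        unfold pvGroupP
        simp only [pvFirstBound, hb, if_false, Bool.false_eq_true]
        cases h : pvFirstBound ss with
        | none => simp
        | some i =>
          simp only [Option.map_some]
          simp [List.take_succ_cons, List.drop_succ_cons, joinE_cons, String.append_assoc]
      rw [h2]

theorem foldA_eq (lines : List String) :
    combine_lines_into_entries lines = combine_lines_into_entries_alt lines := by
  unfold combine_lines_into_entries combine_lines_into_entries_alt
  rw [pvGroup_eq_groupP]
  have h := main_invariant (lines.map PySem.Str.strip) [] ""
  rw [List.foldl_map] at h
  simpa using h

-- ===== VERDICT (by name: the statement is the Claim_ definition above) =====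
theorem combine_lines_into_entries_spec : Claim_equal_combine_lines_into_entries := by
  intro lines _
  unfold Spec_combine_lines_into_entries
  exact foldA_eq lines
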